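-- pv_equiv track=rewrite | github.com/Timenem/python_selen | quests/quest436.py | check_command
-- ===== SOURCE A (Python) =====
-- def check_command(pattern, command):
--     result = []
--     if len(command) < len(list(format(pattern, '0%ib' % len(command)))):
--         return False
--     for i, item in enumerate(list(command)):
--         if list(format(pattern, '0%ib' % len(command)))[i] == str(1):
--             if item.isdigit():
--                 return False
--             else:
--                 result.append(True)
--         if list(format(pattern, '0%ib' % len(command)))[i] == str(0):
--             if not item.isdigit():
--                 return False
--             else:
--                 result.append(True)
--     return all(result)
-- ===== SOURCE B (Python) =====
-- def check_command(pattern, command):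
--     if not command:
--         return False
--     bits = ''.join('0' if c.isdigit() else '1' for c in command)
--     return int(bits, 2) == pattern
-- ===== Notes on version B (the rewrite author's own statement) =====
-- stated objective: simpler
-- what changed: B drops A's per-character branch/early-return loop over a binary string that is recomputed at every step: it encodes the command as a bit string (digit=0, non-digit=1) in one pass and returns whether that value, as an integer, equals pattern, which subsumes both the width guard and the per-bit checks in a single equality.
-- outside the precondition, e.g. on check_command(-1, 'aa'): A returns True, B returns False
import Mathlib
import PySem

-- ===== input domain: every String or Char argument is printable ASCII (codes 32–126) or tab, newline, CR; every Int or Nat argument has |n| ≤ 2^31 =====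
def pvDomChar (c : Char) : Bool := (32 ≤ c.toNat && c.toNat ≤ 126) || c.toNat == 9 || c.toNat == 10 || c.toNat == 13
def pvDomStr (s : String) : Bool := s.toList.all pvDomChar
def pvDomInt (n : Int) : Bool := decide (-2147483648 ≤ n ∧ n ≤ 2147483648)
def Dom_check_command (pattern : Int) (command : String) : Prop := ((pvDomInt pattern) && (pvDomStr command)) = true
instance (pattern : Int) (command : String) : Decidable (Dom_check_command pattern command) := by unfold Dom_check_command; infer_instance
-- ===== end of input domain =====

-- B replaces A's branch-per-character loop over a repeatedly recomputed binary string by a single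
-- fold of the command into an integer compared with pattern (objective: simpler).
-- Python's str.isdigit is ported as Char.isDigit, exact on the printable-ASCII domain Dom.

-- ===== PORT A =====
-- helper: binary digits of a natural number, most significant first (the digits of format(m, 'b'))
def binDigits (m : Nat) : List Char :=
  if m < 2 then [if m = 1 then '1' else '0']
  else binDigits (m / 2) ++ [if m % 2 = 1 then '1' else '0']
termination_by m
decreasing_by omega

-- helper: list(format(p, '0<w>b')) — zero-padded binary, sign first for negatives (exact port of the format call)
def pyFormatBin (p : Int) (w : Nat) : List Char :=
  if p < 0 then
    '-' :: (List.replicate (w - 1 - (binDigits (-p).toNat).length) '0' ++ binDigits (-p).toNat)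
  else
    List.replicate (w - (binDigits p.toNat).length) '0' ++ binDigits p.toNat

-- the for-loop: `result` accumulator, early `return False` as a false leaf; the format list is
-- recomputed at each step exactly as A recomputes it
def checkLoop (pattern : Int) (n : Nat) : List (Int × Char) → List Bool → Bool
  | [], result => result.all (fun b => b)
  | (i, item) :: rest, result =>
      let bs := pyFormatBin pattern n
      if PySem.List.pyGetD bs i ' ' = '1' then
        (if item.isDigit then false
         else
           let result := result ++ [true]
           if PySem.List.pyGetD bs i ' ' = '0' then
             (if !item.isDigit then false else checkLoop pattern n rest (result ++ [true]))
           else checkLoop pattern n rest result)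
      else
        if PySem.List.pyGetD bs i ' ' = '0' then
          (if !item.isDigit then false else checkLoop pattern n rest (result ++ [true]))
        else checkLoop pattern n rest result

def check_command (pattern : Int) (command : String) : Bool :=
  let cs := command.toList
  if cs.length < (pyFormatBin pattern cs.length).length then false
  else checkLoop pattern cs.length (PySem.List.enumerate cs) []

-- ===== PORT B =====
def check_command_alt (pattern : Int) (command : String) : Bool :=
  let cs := command.toList
  if cs = [] then false
  else
    -- int(bits, 2) is ported as the most-significant-first binary fold, exact on '0'/'1' strings
    let bits := cs.map (fun c => if c.isDigit then '0' else '1')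
    decide (bits.foldl (fun v c => v * 2 + (if c = '1' then (1 : Int) else 0)) 0 = pattern)

-- ===== PRECONDITION & SPEC =====
-- Pre_ excludes negative patterns, outside the natural non-negative-bitmask domain: there A silently
-- skips the '-' sign character of the binary string, an artefact B's encoding cannot represent.
def Pre_check_command (pattern : Int) (command : String) : Prop := 0 ≤ pattern
instance (pattern : Int) (command : String) : Decidable (Pre_check_command pattern command) := by unfold Pre_check_command; infer_instance
def pvWitness_check_command : Int × String := (5, "a1a")

def Spec_check_command (pattern : Int) (command : String) (out : Bool) : Prop := out = check_command_alt pattern command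
instance (pattern : Int) (command : String) (out : Bool) : Decidable (Spec_check_command pattern command out) := by unfold Spec_check_command; infer_instance

-- ===== CLAIM (what is proved, stated in full; the proofs are below) =====
def Claim_equal_check_command : Prop := ∀ (pattern : Int) (command : String), Dom_check_command pattern command → Pre_check_command pattern command → Spec_check_command pattern command (check_command pattern command)

-- ===== LEMMAS AND PROOFS =====

def bit (c : Char) : Int := if c = '1' then 1 else 0
def bval (l : List Char) : Int := l.foldl (fun v c => v * 2 + bit c) 0
def isBit (c : Char) : Prop := c = '0' ∨ c = '1'
def encode (cs : List Char) : List Char := cs.map (fun c => if c.isDigit then '0' else '1')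

lemma bval_shift (l : List Char) : ∀ v : Int, l.foldl (fun v c => v * 2 + bit c) v = v * 2 ^ l.length + bval l := by
  induction l with
  | nil => intro v; simp [bval]
  | cons c t ih =>
      intro v
      simp only [List.foldl_cons, List.length_cons, bval] at *
      rw [ih (v * 2 + bit c), ih (0 * 2 + bit c), pow_succ]
      ring

lemma bval_cons (c : Char) (t : List Char) : bval (c :: t) = bit c * 2 ^ t.length + bval t := by
  have := bval_shift t (bit c)
  simp only [bval, List.foldl_cons]
  simpa using this

lemma bval_append_singleton (l : List Char) (c : Char) : bval (l ++ [c]) = bval l * 2 + bit c := by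
  simp [bval, List.foldl_append]

lemma bit_cases {c : Char} (h : isBit c) : bit c = 0 ∨ bit c = 1 := by
  rcases h with h | h <;> simp [h, bit]

lemma bval_bounds : ∀ l : List Char, (∀ c ∈ l, isBit c) → 0 ≤ bval l ∧ bval l < 2 ^ l.length := by
  intro l
  induction l with
  | nil => intro _; simp [bval]
  | cons c t ih =>
      intro h
      have hc := bit_cases (h c (List.mem_cons_self ..))
      have ht := ih (fun x hx => h x (List.mem_cons_of_mem _ hx))
      have hP : (0 : Int) < 2 ^ t.length := pow_pos (by norm_num) _
      rw [bval_cons, List.length_cons, pow_succ]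
      rcases hc with hc | hc <;> rw [hc] <;> omega

lemma bval_inj : ∀ (l₁ l₂ : List Char), (∀ c ∈ l₁, isBit c) → (∀ c ∈ l₂, isBit c) →
    l₁.length = l₂.length → bval l₁ = bval l₂ → l₁ = l₂ := by
  intro l₁
  induction l₁ with
  | nil =>
      intro l₂ _ _ hlen _
      exact (List.length_eq_zero_iff.mp hlen.symm).symm
  | cons c t ih =>
      intro l₂ h₁ h₂ hlen hv
      cases l₂ with
      | nil => simp at hlen
      | cons d u =>
          have hlen' : t.length = u.length := by simpa using hlen
          have hb₁ := bit_cases (h₁ c (List.mem_cons_self ..))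
          have hb₂ := bit_cases (h₂ d (List.mem_cons_self ..))
          have ht := bval_bounds t (fun x hx => h₁ x (List.mem_cons_of_mem _ hx))
          have hu := bval_bounds u (fun x hx => h₂ x (List.mem_cons_of_mem _ hx))
          rw [bval_cons, bval_cons, hlen'] at hv
          have hP : (0 : Int) < 2 ^ u.length := pow_pos (by norm_num) _
          rw [hlen'] at ht
          have hbits : bit c = bit d ∧ bval t = bval u := by
            rcases hb₁ with h1 | h1 <;> rcases hb₂ with h2 | h2 <;> rw [h1, h2] at hv ⊢ <;> omega
          have hcd : c = d := by
            rcases h₁ c (List.mem_cons_self ..) with hc | hc <;>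
            rcases h₂ d (List.mem_cons_self ..) with hd | hd <;>
              simp [hc, hd, bit] at hbits ⊢
          rw [hcd, ih u (fun x hx => h₁ x (List.mem_cons_of_mem _ hx))
            (fun x hx => h₂ x (List.mem_cons_of_mem _ hx)) hlen' hbits.2]

lemma bval_rep (k : Nat) (l : List Char) : bval (List.replicate k '0' ++ l) = bval l := by
  induction k with
  | zero => simp
  | succ k ih =>
      rw [List.replicate_succ, List.cons_append, bval_cons, ih]
      simp [bit]

lemma binDigits_bits (m : Nat) : ∀ c ∈ binDigits m, isBit c := by
  fun_induction binDigits m with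
  | case1 m h =>
      intro c hc
      simp only [List.mem_singleton] at hc
      subst hc; split <;> simp [isBit]
  | case2 m h ih =>
      intro c hc
      rcases List.mem_append.mp hc with hc | hc
      · exact ih c hc
      · simp only [List.mem_singleton] at hc
        subst hc; split <;> simp [isBit]

lemma binDigits_ne_nil (m : Nat) : binDigits m ≠ [] := by
  fun_induction binDigits m <;> simp

lemma binDigits_val (m : Nat) : bval (binDigits m) = (m : Int) := by
  fun_induction binDigits m with
  | case1 m h =>
      interval_cases m <;> simp [bval, bit]
  | case2 m h ih =>
      rw [bval_append_singleton, ih]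
      have h2 := Nat.div_add_mod m 2
      have : m % 2 = 0 ∨ m % 2 = 1 := by omega
      rcases this with h1 | h1 <;> simp [h1, bit] <;> omega

lemma binDigits_len_le : ∀ (n m : Nat), 1 ≤ n → m < 2 ^ n → (binDigits m).length ≤ n := by
  intro n
  induction n with
  | zero => intro m h; omega
  | succ n ih =>
      intro m _ hm
      by_cases h : m < 2
      · rw [binDigits, if_pos h]; simp
      · rw [binDigits, if_neg h]
        have hn : 1 ≤ n := by
          by_contra hn
          have : n = 0 := by omega
          subst this; simp [pow_succ] at hm; omega
        have : m / 2 < 2 ^ n := by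
          rw [pow_succ] at hm; omega
        have := ih (m / 2) hn this
        simp [List.length_append]; omega

lemma binDigits_lt (m : Nat) : (m : Int) < 2 ^ (binDigits m).length := by
  have := bval_bounds (binDigits m) (binDigits_bits m)
  rw [binDigits_val] at this
  exact this.2

lemma checkLoop_eq (pattern : Int) (n : Nat) :
    ∀ (pairs : List (Int × Char)) (result : List Bool),
    (∀ p ∈ pairs, isBit (PySem.List.pyGetD (pyFormatBin pattern n) p.1 ' ')) →
    checkLoop pattern n pairs result =
      (result.all (fun b => b) && pairs.all
        (fun p => if PySem.List.pyGetD (pyFormatBin pattern n) p.1 ' ' = '1' then !p.2.isDigit else p.2.isDigit)) := by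
  intro pairs
  induction pairs with
  | nil => intro result _; simp [checkLoop]
  | cons p rest ih =>
      intro result hb
      obtain ⟨i, item⟩ := p
      have hbi := hb (i, item) (List.mem_cons_self ..)
      have hrest := fun q hq => hb q (List.mem_cons_of_mem _ hq)
      rcases hbi with h0 | h1
      · -- bs[i] = '0'
        rw [checkLoop]
        simp only [h0, Char.reduceEq, reduceIte]
        by_cases hd : item.isDigit
        · rw [if_neg (by simp [hd]), ih _ hrest]
          simp [h0, hd]
        · rw [if_pos (by simp [hd])]
          simp [h0, hd]
      · -- bs[i] = '1'
        rw [checkLoop]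
        simp only [h1, Char.reduceEq, reduceIte]
        by_cases hd : item.isDigit
        · rw [if_pos hd]
          simp [h1, hd]
        · rw [if_neg hd, ih _ hrest]
          simp [h1, hd]

lemma pyFormatBin_nonneg_eq {p : Int} (hp : 0 ≤ p) (w : Nat) :
    pyFormatBin p w = List.replicate (w - (binDigits p.toNat).length) '0' ++ binDigits p.toNat := by
  rw [pyFormatBin, if_neg (by omega)]

lemma pyFormatBin_bits {p : Int} (hp : 0 ≤ p) (w : Nat) :
    ∀ c ∈ pyFormatBin p w, isBit c := by
  rw [pyFormatBin_nonneg_eq hp]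
  intro c hc
  rcases List.mem_append.mp hc with hc | hc
  · rw [List.eq_of_mem_replicate hc]; exact Or.inl rfl
  · exact binDigits_bits _ c hc

lemma pyFormatBin_val {p : Int} (hp : 0 ≤ p) (w : Nat) : bval (pyFormatBin p w) = p := by
  rw [pyFormatBin_nonneg_eq hp, bval_rep, binDigits_val, Int.toNat_of_nonneg hp]

lemma encode_bits (cs : List Char) : ∀ c ∈ encode cs, isBit c := by
  intro c hc
  rcases List.mem_map.mp hc with ⟨x, _, hx⟩
  subst hx; split <;> simp [isBit]

lemma altfold (cs : List Char) :
    (cs.map (fun c => if c.isDigit then '0' else '1')).foldl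
      (fun v c => v * 2 + (if c = '1' then (1 : Int) else 0)) 0 = bval (encode cs) := rfl

-- ===== VERDICT (by name: the statement is the Claim_ definition above) =====
lemma main_eq (pattern : Int) (hpre' : 0 ≤ pattern) (cs : List Char) :
    (if cs.length < (pyFormatBin pattern cs.length).length then false
     else checkLoop pattern cs.length (PySem.List.enumerate cs) []) =
    (if cs = [] then false
     else decide ((cs.map (fun c => if c.isDigit then '0' else '1')).foldl
       (fun v c => v * 2 + (if c = '1' then (1 : Int) else 0)) 0 = pattern)) := by
  have hEnc : (cs.map (fun c => if c.isDigit then '0' else '1')).foldl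
      (fun v c => v * 2 + (if c = '1' then (1 : Int) else 0)) 0 = bval (encode cs) :=
    altfold cs
  have hEncLen : (encode cs).length = cs.length := by simp [encode]
  have hEnc0 : 0 ≤ bval (encode cs) := (bval_bounds (encode cs) (encode_bits cs)).1
  have hEnc1 : bval (encode cs) < 2 ^ cs.length := by
    have := (bval_bounds (encode cs) (encode_bits cs)).2
    rwa [hEncLen] at this
  have hlenbs : (pyFormatBin pattern cs.length).length
      = (cs.length - (binDigits pattern.toNat).length) + (binDigits pattern.toNat).length := by
    rw [pyFormatBin_nonneg_eq hpre']
    simp [List.length_append]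
  by_cases hnil : cs = []
  · -- empty command: both sides False
    have hd1 : 1 ≤ (binDigits pattern.toNat).length :=
      List.length_pos_iff.mpr (binDigits_ne_nil pattern.toNat)
    rw [if_pos hnil, if_pos (by rw [hlenbs]; subst hnil; simp; omega)]
  · rw [if_neg hnil]
    have hn1 : 1 ≤ cs.length := List.length_pos_iff.mpr hnil
    have hvalbs : bval (pyFormatBin pattern cs.length) = pattern := pyFormatBin_val hpre' cs.length
    by_cases hbig : (2 : Int) ^ cs.length ≤ pattern
    · -- pattern too wide: A fails the width guard, B's value is < 2^|cs| ≤ pattern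
      have hplt : pattern < 2 ^ (binDigits pattern.toNat).length := by
        have := binDigits_lt pattern.toNat
        rwa [Int.toNat_of_nonneg hpre'] at this
      have hdn : cs.length < (binDigits pattern.toNat).length := by
        by_contra h
        have : (2 : Int) ^ (binDigits pattern.toNat).length ≤ 2 ^ cs.length :=
          pow_le_pow_right₀ (by norm_num) (by omega)
        omega
      rw [if_pos (by rw [hlenbs]; omega), hEnc]
      symm
      simp only [decide_eq_false_iff_not]
      omega
    · -- pattern fits in cs.length bits
      rw [not_le] at hbig
      have hpn : pattern.toNat < 2 ^ cs.length := by
        have h2 : ((2 ^ cs.length : Nat) : Int) = 2 ^ cs.length := by push_cast; ring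
        omega
      have hdn : (binDigits pattern.toNat).length ≤ cs.length :=
        binDigits_len_le cs.length pattern.toNat hn1 hpn
      have hlen : (pyFormatBin pattern cs.length).length = cs.length := by rw [hlenbs]; omega
      rw [if_neg (by omega)]
      have hbits := pyFormatBin_bits hpre' cs.length
      have hidx : ∀ p ∈ PySem.List.enumerate cs,
          isBit (PySem.List.pyGetD (pyFormatBin pattern cs.length) p.1 ' ') := by
        intro p hp
        obtain ⟨k, hk, hpk⟩ := (PySem.List.mem_enumerate_iff _ _ _).mp hp
        subst hpk
        simp only [zero_add, PySem.List.pyGetD_natCast]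
        rw [List.getD_eq_getElem _ _ (by omega)]
        exact hbits _ (List.getElem_mem _)
      rw [checkLoop_eq pattern cs.length _ [] hidx]
      simp only [List.all_nil, Bool.true_and]
      have hA : ((PySem.List.enumerate cs).all
          (fun p => if PySem.List.pyGetD (pyFormatBin pattern cs.length) p.1 ' ' = '1'
                    then !p.2.isDigit else p.2.isDigit) = true)
          ↔ pyFormatBin pattern cs.length = encode cs := by
        rw [List.all_eq_true]
        constructor
        · intro h
          apply List.ext_getElem (by omega)
          intro k h1 h2
          have hk : k < cs.length := by omega
          have hmem : (((k : Nat) : Int), cs[k]) ∈ PySem.List.enumerate cs := by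
            rw [PySem.List.mem_enumerate_iff]
            exact ⟨k, hk, by simp⟩
          have := h _ hmem
          simp only [zero_add, PySem.List.pyGetD_natCast] at this
          rw [List.getD_eq_getElem _ _ (by omega)] at this
          have hbk := hbits _ (List.getElem_mem h1)
          simp only [encode, List.getElem_map]
          rcases hbk with hb | hb <;> rw [hb] at this ⊢ <;>
            by_cases hd : cs[k].isDigit <;> simp_all
        · intro h p hp
          obtain ⟨k, hk, hpk⟩ := (PySem.List.mem_enumerate_iff _ _ _).mp hp
          subst hpk
          simp only [zero_add, PySem.List.pyGetD_natCast]
          rw [List.getD_eq_getElem _ _ (by omega), List.getElem_of_eq h]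
          simp only [encode, List.getElem_map]
          by_cases hd : cs[k].isDigit <;> simp [hd]
      have hiff : pyFormatBin pattern cs.length = encode cs ↔ bval (encode cs) = pattern := by
        constructor
        · intro h; rw [← h, hvalbs]
        · intro h
          exact bval_inj _ _ hbits (encode_bits cs) (by omega) (by rw [hvalbs, h])
      rw [hEnc]
      rcases Bool.eq_false_or_eq_true ((PySem.List.enumerate cs).all _) with h | h <;> rw [h]
      · symm
        rw [decide_eq_true_eq]
        exact hiff.mp (hA.mp h)
      · symm
        rw [decide_eq_false_iff_not]
        intro hv
        rw [← hiff] at hv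
        rw [hA.mpr hv] at h
        cases h

theorem check_command_spec : Claim_equal_check_command := by
  intro pattern command _ hpre
  unfold Spec_check_command check_command check_command_alt
  exact main_eq pattern hpre command.toList
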